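-- pv_equiv track=rewrite | github.com/gustavoGuapeco/leitor-nf-ia | app/services/procedure_matcher.py | _multi_keyword_parts_match
-- ===== SOURCE A (Python) =====
-- def _token_matches_keyword(token: str, keyword_norm: str) -> bool:
--     """
--     Compara token (da nota ou do pedido) com uma keyword, sem igualdade literal rígida.
--
--     Cobre singular/plural simples em PT (ex.: consulta/consultas, exame/exames) e
--     pequenas diferenças de sufixo, desde que o radical compartilhado tenha tamanho mínimo
--     (evita falso positivo em palavras muito curtas).
--     """
--     if not token or not keyword_norm:
--         return False
--     if token == keyword_norm:
--         return True
--
--     min_root = 4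
--     a, b = token, keyword_norm
--     if len(a) > len(b):
--         a, b = b, a
--     # a é o mais curto
--     if len(a) < min_root:
--         return False
--     return bool(b.startswith(a) and len(b) - len(a) <= 2)
--
-- def _multi_keyword_parts_match(parts: list[str], tokens: list[str]) -> bool:
--     """Partes da frase-chave aparecem em ordem, com match flexível por token."""
--     if not parts:
--         return True
--     first, rest = parts[0], parts[1:]
--     for i, tok in enumerate(tokens):
--         if _token_matches_keyword(tok, first) and _multi_keyword_parts_match(rest, tokens[i + 1 :]):
--             return True
--     return False
-- ===== SOURCE B (Python) =====
-- def _token_matches_keyword(token: str, keyword_norm: str) -> bool: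
--     if not token or not keyword_norm:
--         return False
--     if token == keyword_norm:
--         return True
--     min_root = 4
--     a, b = token, keyword_norm
--     if len(a) > len(b):
--         a, b = b, a
--     if len(a) < min_root:
--         return False
--     return bool(b.startswith(a) and len(b) - len(a) <= 2)
--
-- def _multi_keyword_parts_match(parts: list, tokens: list) -> bool:
--     # Greedy two-pointer subsequence matching: one pass over tokens.
--     i = j = 0
--     while i < len(parts) and j < len(tokens):
--         if _token_matches_keyword(tokens[j], parts[i]):
--             i += 1
--         j += 1
--     return i == len(parts)
-- ===== Notes on version B (the rewrite author's own statement) =====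
-- stated objective: faster
-- what changed: Replaced the recursive backtracking search (for each part, try every later token position recursively) by a greedy two-pointer single pass over tokens, equivalent for ordered-subsequence matching; intended as faster (measured 13.45x at n=256; A timed out at n=1024 where B returned).
import Mathlib
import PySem

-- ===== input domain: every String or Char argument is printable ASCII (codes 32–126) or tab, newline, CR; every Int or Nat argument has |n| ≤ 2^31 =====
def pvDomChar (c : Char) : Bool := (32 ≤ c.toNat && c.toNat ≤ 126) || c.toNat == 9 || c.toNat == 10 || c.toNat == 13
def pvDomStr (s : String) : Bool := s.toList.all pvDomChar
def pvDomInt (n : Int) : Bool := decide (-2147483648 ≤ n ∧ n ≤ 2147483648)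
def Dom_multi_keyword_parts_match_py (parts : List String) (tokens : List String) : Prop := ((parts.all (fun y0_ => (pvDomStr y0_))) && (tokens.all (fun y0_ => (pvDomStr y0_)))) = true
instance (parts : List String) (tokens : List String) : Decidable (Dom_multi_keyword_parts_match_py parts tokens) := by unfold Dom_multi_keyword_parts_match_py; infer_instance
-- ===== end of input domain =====

-- B replaces A's recursive backtracking search by a greedy two-pointer single pass; intended as faster (measured 13.45x at n=256, A timed out at n=1024 where B returned).


-- ===== PORT A =====
-- shared helper _token_matches_keyword (identical in both Python versions)
def token_matches_keyword (token : String) (keyword_norm : String) : Bool :=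
  if PySem.Str.len token = 0 || PySem.Str.len keyword_norm = 0 then false
  else if token == keyword_norm then true
  else
    let min_root : Int := 4
    let a := token
    let b := keyword_norm
    let p := if PySem.Str.len a > PySem.Str.len b then (b, a) else (a, b)
    let a := p.1
    let b := p.2
    if PySem.Str.len a < min_root then false
    else PySem.Str.startswith b a && decide (PySem.Str.len b - PySem.Str.len a ≤ 2)

mutual
-- literal port of A: recurse on parts, for-loop over tokens trying each position
def multi_keyword_parts_match_py : List String → List String → Bool
  | [], _ => true
  | first :: rest, tokens => pyLoopA first rest tokens
termination_by parts tokens => parts.length + tokens.length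
decreasing_by all_goals simp <;> omega
def pyLoopA (first : String) (rest : List String) : List String → Bool
  | [] => false
  | t :: ts => (token_matches_keyword t first && multi_keyword_parts_match_py rest ts) || pyLoopA first rest ts
termination_by tokens => rest.length + tokens.length
decreasing_by all_goals simp <;> omega
end

-- ===== PORT B =====
-- greedy two-pointer: advance the part pointer on the first matching token
def multi_keyword_parts_match_py_alt : List String → List String → Bool
  | [], _ => true
  | _ :: _, [] => false
  | p :: ps, t :: ts =>
    if token_matches_keyword t p then multi_keyword_parts_match_py_alt ps ts
    else multi_keyword_parts_match_py_alt (p :: ps) ts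
termination_by parts tokens => tokens.length

-- ===== PRECONDITION & SPEC =====
def Spec_multi_keyword_parts_match_py (parts : List String) (tokens : List String) (out : Bool) : Prop := out = multi_keyword_parts_match_py_alt parts tokens
instance (parts : List String) (tokens : List String) (out : Bool) : Decidable (Spec_multi_keyword_parts_match_py parts tokens out) := by unfold Spec_multi_keyword_parts_match_py; infer_instance

-- ===== CLAIM (what is proved, stated in full; the proofs are below) =====
def Claim_equal_multi_keyword_parts_match_py : Prop := ∀ (parts : List String) (tokens : List String), Dom_multi_keyword_parts_match_py parts tokens → Spec_multi_keyword_parts_match_py parts tokens (multi_keyword_parts_match_py parts tokens)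

-- ===== LEMMAS AND PROOFS =====

theorem pyA_cons_cons (f : String) (r : List String) (t : String) (ts : List String) :
    multi_keyword_parts_match_py (f :: r) (t :: ts)
      = ((token_matches_keyword t f && multi_keyword_parts_match_py r ts)
          || multi_keyword_parts_match_py (f :: r) ts) := by
  simp [multi_keyword_parts_match_py, pyLoopA]

-- a successful match survives prepending a token
theorem pyA_mono_tokens (ps : List String) (t : String) (ts : List String)
    (h : multi_keyword_parts_match_py ps ts = true) :
    multi_keyword_parts_match_py ps (t :: ts) = true := by
  cases ps with
  | nil => simp [multi_keyword_parts_match_py]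
  | cons q qs => rw [pyA_cons_cons]; simp [h]

-- a successful match survives dropping the first part
theorem pyA_mono_parts (ts : List String) (p : String) (ps : List String)
    (h : multi_keyword_parts_match_py (p :: ps) ts = true) :
    multi_keyword_parts_match_py ps ts = true := by
  induction ts with
  | nil => simp [multi_keyword_parts_match_py, pyLoopA] at h
  | cons t ts ih =>
    rw [pyA_cons_cons] at h
    rcases Bool.or_eq_true_iff.mp h with h1 | h2
    · exact pyA_mono_tokens ps t ts (Bool.and_eq_true_iff.mp h1).2
    · exact pyA_mono_tokens ps t ts (ih h2)

theorem pyA_eq_alt (tokens parts : List String) :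
    multi_keyword_parts_match_py parts tokens = multi_keyword_parts_match_py_alt parts tokens := by
  induction tokens generalizing parts with
  | nil =>
    cases parts with
    | nil => simp [multi_keyword_parts_match_py, multi_keyword_parts_match_py_alt]
    | cons p ps => simp [multi_keyword_parts_match_py, pyLoopA, multi_keyword_parts_match_py_alt]
  | cons t ts ih =>
    cases parts with
    | nil => simp [multi_keyword_parts_match_py, multi_keyword_parts_match_py_alt]
    | cons p ps =>
      rw [pyA_cons_cons, multi_keyword_parts_match_py_alt]
      by_cases hm : token_matches_keyword t p = true
      · simp only [hm, if_pos, Bool.true_and]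
        rw [← ih ps]
        by_cases hb : multi_keyword_parts_match_py (p :: ps) ts = true
        · simp [hb, pyA_mono_parts ts p ps hb]
        · simp [Bool.eq_false_iff.mpr hb]
      · simp only [Bool.eq_false_iff.mpr hm, Bool.false_and, Bool.false_or]
        exact ih (p :: ps)

-- ===== VERDICT (by name: the statement is the Claim_ definition above) =====
theorem multi_keyword_parts_match_py_spec : Claim_equal_multi_keyword_parts_match_py := by
  intro parts tokens _
  exact pyA_eq_alt tokens parts
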